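-- pv_equiv track=rewrite | github.com/rudkoLA/pathfinding-comparison | main/dfs.py | dfs
-- ===== SOURCE A (Python) =====
-- def dfs(graph: dict, start: int, end: int) -> tuple[list[int], int]:
--     """
--     :param graph: dict, A dictionary where keys are nodes and values are
--     lists of tuples (neighbor, weight).
--     :param start: int, The starting node.
--     :param end: int, The goal node.
--
--     :return: tuple[list[int], int], shortest path, which is presented in a
--     tuple (path: list of nodes, weight).
--     >>> dfs({\
--         1: [(2, 3), (3, 1)], \
--         2: [(1, 3), (5, 4)], \
--         3: [(4, 1), (6, 3)], \
--         4: [(3, 1), (6, 3)], \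
--         5: [(2, 4)], \
--         6: [(4, 3), (3, 3)]\
--         }, 1, 6)
--     ([1, 3, 6], 4)
--     """
--     def dfs_algorithm(node: int, path: list[int], weight: int) -> tuple[list[int], int] | None:
--         path.append(node)
--
--         if node == end:
--             result = (list(path), weight)
--         else:
--             result = None
--             for neighbor, edge_weight in graph[node]:
--                 if neighbor not in path:
--                     sub_result = dfs_algorithm(neighbor, path, weight + edge_weight)
--                     if sub_result:
--                         if not result or sub_result[1] < result[1]:
--                             result = sub_result
--
--         path.pop()
--         return result
--
--     return dfs_algorithm(start, [], 0)
-- ===== SOURCE B (Python) =====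
-- def dfs(graph: dict, start: int, end: int) -> tuple[list[int], int]:
--     """Iterative explicit-stack DFS over simple paths; keeps the first
--     strictly-minimal-weight path found in the same preorder as the
--     recursive version (children pushed in reversed order)."""
--     best = None
--     stack = [(start, [start], 0)]
--     while stack:
--         node, path, weight = stack.pop()
--         if node == end:
--             if best is None or weight < best[1]:
--                 best = (path, weight)
--         else:
--             for neighbor, edge_weight in reversed(graph[node]):
--                 if neighbor not in path:
--                     stack.append((neighbor, path + [neighbor], weight + edge_weight))
--     return best
-- ===== Notes on version B (the rewrite author's own statement) =====
-- stated objective: alternative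
-- what changed: Replaced the recursive backtracking DFS (mutating a shared path list) by an iterative explicit-stack DFS whose frames carry (node, path, weight), pushing neighbors in reversed order so pops follow the same preorder and the first strictly-minimal path wins identically.
import Mathlib
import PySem

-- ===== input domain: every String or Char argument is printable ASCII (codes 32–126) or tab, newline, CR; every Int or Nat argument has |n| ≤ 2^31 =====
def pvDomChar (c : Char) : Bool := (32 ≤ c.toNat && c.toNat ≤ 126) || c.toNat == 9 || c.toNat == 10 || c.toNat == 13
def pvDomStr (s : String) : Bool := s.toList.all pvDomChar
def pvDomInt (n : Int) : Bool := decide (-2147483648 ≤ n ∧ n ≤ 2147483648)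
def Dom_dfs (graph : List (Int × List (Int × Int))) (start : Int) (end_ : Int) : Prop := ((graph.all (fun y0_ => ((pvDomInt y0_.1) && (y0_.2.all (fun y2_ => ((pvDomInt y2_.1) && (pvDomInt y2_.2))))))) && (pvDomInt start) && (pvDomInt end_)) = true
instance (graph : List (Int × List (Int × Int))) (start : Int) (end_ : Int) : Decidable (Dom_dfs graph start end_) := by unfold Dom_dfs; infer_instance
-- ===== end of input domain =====

-- B is an iterative explicit-stack DFS replacing A's recursive backtracking DFS (alternative
-- decomposition, same exploration preorder and tie-breaking); return-value equivalence only
-- (A mutates only its internal path list, no argument).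

-- ===== PORT A =====

-- graph[node]: first-match association-list lookup (a Python dict has unique keys); the
-- `getD []` default is only taken outside Pre_dfs, where the Python raises KeyError.
def pvAdj (graph : List (Int × List (Int × Int))) (node : Int) : List (Int × Int) :=
  ((graph.find? (fun p => p.1 == node)).map Prod.snd).getD []

-- A's accumulation: `if sub_result: if not result or sub_result[1] < result[1]: result = sub_result`.
def pvCombine (b r : Option (List Int × Int)) : Option (List Int × Int) :=
  match r with
  | none => b
  | some s =>
    match b with
    | none => some s
    | some bb => if s.2 < bb.2 then some s else some bb

-- Fuel bound for the recursion depth: the path stays duplicate-free and every node on it is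
-- the start or some listed neighbour, so depth ≤ 1 + total number of neighbour entries.
def pvFuel (graph : List (Int × List (Int × Int))) : Nat :=
  (graph.map (fun p => p.2.length)).sum + 2

-- dfs_algorithm: `path` here is the list AFTER `path.append(node)` (the append/pop pair on the
-- shared list is pure in effect, so the appended list is passed instead).
def dfsRec (graph : List (Int × List (Int × Int))) (end_ : Int) :
    Nat → Int → List Int → Int → Option (List Int × Int)
  | 0, _, _, _ => none   -- fuel guard, never reached with pvFuel
  | f + 1, node, path, weight =>
    if node = end_ then some (path, weight)
    else
      (pvAdj graph node).foldl
        (fun res nb =>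
          if nb.1 ∈ path then res
          else pvCombine res (dfsRec graph end_ f nb.1 (path ++ [nb.1]) (weight + nb.2)))
        none

def dfs (graph : List (Int × List (Int × Int))) (start : Int) (end_ : Int) : Option (List Int × Int) :=
  dfsRec graph end_ (pvFuel graph) start [start] 0

-- ===== PORT B =====

-- used by runB's termination measure
theorem pvAdj_length_le (graph : List (Int × List (Int × Int))) (node : Int) :
    (pvAdj graph node).length ≤ (graph.map (fun p => p.2.length)).sum := by
  unfold pvAdj
  cases h : graph.find? (fun p => p.1 == node) with
  | none => simp
  | some p =>
    have hmem : p ∈ graph := List.mem_of_find?_eq_some h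
    have : p.2.length ∈ graph.map (fun q => q.2.length) := List.mem_map_of_mem hmem
    simpa using List.single_le_sum (by intro x _; exact Nat.zero_le x) _ this

theorem pv_child_sum (T f : Nat) (l : List (Int × Int)) (path : List Int) (w : Int) :
    ((l.map (fun nb => (nb.1, path ++ [nb.1], w + nb.2, f))).map
        (fun fr : Int × List Int × Int × Nat => (T + 1) ^ fr.2.2.2)).sum
      = l.length * (T + 1) ^ f := by
  induction l with
  | nil => simp
  | cons x xs ih => simp only [List.map_cons, List.sum_cons, List.length_cons, ih]; ring

-- best-update on reaching `end`: `if best is None or weight < best[1]: best = (path, weight)`.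
def pvBetter (best : Option (List Int × Int)) (path : List Int) (weight : Int) :
    Option (List Int × Int) :=
  match best with
  | none => some (path, weight)
  | some bb => if weight < bb.2 then some (path, weight) else some bb

-- the while-loop: stack head = top; pushing `reversed(graph[node])` onto the stack end is
-- prepending the filtered child list in original order; each frame carries its depth fuel
-- (a totality guard only, never exhausted with pvFuel).
def runB (graph : List (Int × List (Int × Int))) (end_ : Int) :
    List (Int × List Int × Int × Nat) → Option (List Int × Int) → Option (List Int × Int)
  | [], best => best
  | (_, _, _, 0) :: rest, best => runB graph end_ rest best
  | (node, path, weight, f + 1) :: rest, best =>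
    if node = end_ then
      runB graph end_ rest (pvBetter best path weight)
    else
      runB graph end_
        ((((pvAdj graph node).filter (fun nb => !(path.contains nb.1))).map
            (fun nb => (nb.1, path ++ [nb.1], weight + nb.2, f))) ++ rest)
        best
termination_by stack _ => (stack.map (fun fr => ((graph.map (fun p => p.2.length)).sum + 1) ^ fr.2.2.2)).sum
decreasing_by
  · simp
  · simp
  · simp only [List.map_append, List.sum_append, List.map_cons, List.sum_cons,
      Nat.succ_eq_add_one]
    rw [pv_child_sum]
    have h2 : ((pvAdj graph node).filter (fun nb => !(path.contains nb.1))).length ≤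
        (graph.map (fun p => p.2.length)).sum :=
      le_trans (List.length_filter_le _ _) (pvAdj_length_le graph node)
    have h3 : 0 < ((graph.map (fun p => p.2.length)).sum + 1) ^ f := by positivity
    have h4 : ((pvAdj graph node).filter (fun nb => !(path.contains nb.1))).length *
        ((graph.map (fun p => p.2.length)).sum + 1) ^ f <
        ((graph.map (fun p => p.2.length)).sum + 1) ^ (f + 1) := by
      calc _ < ((graph.map (fun p => p.2.length)).sum + 1) *
                ((graph.map (fun p => p.2.length)).sum + 1) ^ f :=
              Nat.mul_lt_mul_of_lt_of_le (by omega) (le_refl _) h3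
           _ = _ := by ring
    omega

def dfs_alt (graph : List (Int × List (Int × Int))) (start : Int) (end_ : Int) : Option (List Int × Int) :=
  runB graph end_ [(start, [start], 0, pvFuel graph)] none

-- ===== PRECONDITION & SPEC =====

-- Pre_dfs excludes exactly the KeyError inputs: A raises iff some node reachable from start
-- (following adjacency, never expanding the end node) is neither a dict key nor the end node.
-- pvReach is the bounded reachability closure (stable after graph.length steps); it inspects
-- only the input graph, not either algorithm's path/weight computation.
def pvExpand (graph : List (Int × List (Int × Int))) (end_ : Int) (S : List Int) : List Int :=
  S ++ S.flatMap (fun v => if v = end_ then [] else (pvAdj graph v).map Prod.fst)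

def pvReach (graph : List (Int × List (Int × Int))) (start : Int) (end_ : Int) : List Int :=
  (pvExpand graph end_)^[graph.length + 1] [start]

def Pre_dfs (graph : List (Int × List (Int × Int))) (start : Int) (end_ : Int) : Prop :=
  ∀ v ∈ pvReach graph start end_, v = end_ ∨ v ∈ graph.map Prod.fst

instance (graph : List (Int × List (Int × Int))) (start : Int) (end_ : Int) : Decidable (Pre_dfs graph start end_) := by unfold Pre_dfs; infer_instance

def pvWitness_dfs : (List (Int × List (Int × Int))) × Int × Int := ([(1, [(2, 3)]), (2, [])], 1, 2)

def Spec_dfs (graph : List (Int × List (Int × Int))) (start : Int) (end_ : Int) (out : Option (List Int × Int)) : Prop := out = dfs_alt graph start end_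
instance (graph : List (Int × List (Int × Int))) (start : Int) (end_ : Int) (out : Option (List Int × Int)) : Decidable (Spec_dfs graph start end_ out) := by unfold Spec_dfs; infer_instance

-- ===== CLAIM (what is proved, stated in full; the proofs are below) =====
def Claim_equal_dfs : Prop := ∀ (graph : List (Int × List (Int × Int))) (start : Int) (end_ : Int), Dom_dfs graph start end_ → Pre_dfs graph start end_ → Spec_dfs graph start end_ (dfs graph start end_)

-- ===== LEMMAS AND PROOFS =====

theorem pvCombine_none_right (b : Option (List Int × Int)) : pvCombine b none = b := rfl

theorem pvCombine_none_left (r : Option (List Int × Int)) : pvCombine none r = r := by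
  cases r <;> rfl

theorem pvCombine_assoc (a b c : Option (List Int × Int)) :
    pvCombine (pvCombine a b) c = pvCombine a (pvCombine b c) := by
  rcases a with _ | a <;> rcases b with _ | b <;> rcases c with _ | c <;>
    simp only [pvCombine] <;> split_ifs <;>
      (try simp only [pvCombine]) <;> (try split_ifs) <;> first | rfl | omega

-- Hoisting the accumulator out of A's inner fold.
theorem pv_fold_hoist (g : (Int × Int) → Option (List Int × Int)) (path : List Int) :
    ∀ (l : List (Int × Int)) (b : Option (List Int × Int)),
      l.foldl (fun res nb => if nb.1 ∈ path then res else pvCombine res (g nb)) b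
        = pvCombine b (l.foldl (fun res nb => if nb.1 ∈ path then res else pvCombine res (g nb)) none) := by
  intro l
  induction l with
  | nil => intro b; simp [pvCombine_none_right]
  | cons x xs ih =>
    intro b
    simp only [List.foldl_cons]
    rw [ih, ih (if x.1 ∈ path then none else pvCombine none (g x))]
    by_cases h : x.1 ∈ path
    · simp [h, pvCombine_none_left]
    · simp [h, pvCombine_none_left, pvCombine_assoc]

-- The machine computes, frame by frame, the combination of the recursive results.
theorem runB_eq (graph : List (Int × List (Int × Int))) (end_ : Int) :
    ∀ (stack : List (Int × List Int × Int × Nat)) (best : Option (List Int × Int)),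
      runB graph end_ stack best
        = stack.foldl (fun b fr => pvCombine b (dfsRec graph end_ fr.2.2.2 fr.1 fr.2.1 fr.2.2.1)) best := by
  intro stack best
  induction stack, best using runB.induct graph end_ with
  | case1 best => simp [runB]
  | case2 n p w rest best ih =>
    simp only [runB, ih, List.foldl_cons, dfsRec, pvCombine_none_right]
  | case3 p w f rest best ih =>
    have hd : dfsRec graph end_ (f + 1) end_ p w = some (p, w) := by simp [dfsRec]
    have hL : runB graph end_ ((end_, p, w, f + 1) :: rest) best
        = runB graph end_ rest (pvBetter best p w) := by
      rw [runB.eq_def]; simp only []; simp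
    rw [hL, ih, List.foldl_cons]
    congr 1
    simp only [hd]
    cases best <;> simp [pvBetter, pvCombine]
  | case4 node p w f rest best hend ih =>
    have hL : runB graph end_ ((node, p, w, f + 1) :: rest) best
        = runB graph end_ ((((pvAdj graph node).filter (fun nb => !(p.contains nb.1))).map
              (fun nb => (nb.1, p ++ [nb.1], w + nb.2, f))) ++ rest) best := by
      rw [runB.eq_def]; simp only []; rw [if_neg hend]
    rw [hL, ih, List.foldl_append, List.foldl_cons]
    congr 1
    have hR : dfsRec graph end_ (f + 1) node p w
        = (pvAdj graph node).foldl
            (fun res nb => if nb.1 ∈ p then res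
              else pvCombine res (dfsRec graph end_ f nb.1 (p ++ [nb.1]) (w + nb.2))) none := by
      simp only [dfsRec]; rw [if_neg hend]
    rw [List.foldl_map, List.foldl_filter, hR, ← pv_fold_hoist]
    apply List.foldl_ext
    intro b nb _
    by_cases h : nb.1 ∈ p <;> simp [h]

-- ===== VERDICT (by name: the statement is the Claim_ definition above) =====
theorem dfs_spec : Claim_equal_dfs := by
  intro graph start end_ _ _
  unfold Spec_dfs dfs dfs_alt
  rw [runB_eq]
  simp [pvCombine_none_left]
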